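-- pv_equiv track=rewrite | github.com/Remjohn/cmf | 🇫🇷 Conscious Movie Factory/Motion Cookbook/00_Architecture/shared_agents/semantic_labeler_agent.py | _determine_primary
-- ===== SOURCE A (Python) =====
-- from typing import Dict, List, Set
--
-- def _determine_primary(semantics: List[str], spatial: Dict) -> str:
--     """Determine primary semantic label"""
--     if not semantics:
--         return "unknown"
--
--     # Priority order
--     priority = [
--         "person", "subject",
--         "gut", "brain", "heart",
--         "hub", "node",
--         "foreground", "background"
--     ]
--
--     for sem in priority:
--         if sem in semantics:
--             return sem
--
--     return semantics[0]
-- ===== SOURCE B (Python) =====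
-- def _determine_primary(semantics, spatial):
--     """Determine primary semantic label"""
--     if not semantics:
--         return "unknown"
--
--     priority = [
--         "person", "subject",
--         "gut", "brain", "heart",
--         "hub", "node",
--         "foreground", "background"
--     ]
--
--     rank = {label: i for i, label in enumerate(priority)}
--     n = len(priority)
--     # single pass over semantics; min keeps the first element of minimal rank,
--     # and an all-absent list yields semantics[0] since every rank is n
--     return min(semantics, key=lambda s: rank.get(s, n))
-- ===== Notes on version B (the rewrite author's own statement) =====
-- stated objective: alternative
-- what changed: Instead of scanning the fixed priority list with a membership test into semantics per label, B builds a rank table from the priority list once and returns min(semantics, key=rank), a single pass over semantics; first-minimal ties of min reproduce A's first-match/semantics[0] behaviour.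
import Mathlib
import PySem

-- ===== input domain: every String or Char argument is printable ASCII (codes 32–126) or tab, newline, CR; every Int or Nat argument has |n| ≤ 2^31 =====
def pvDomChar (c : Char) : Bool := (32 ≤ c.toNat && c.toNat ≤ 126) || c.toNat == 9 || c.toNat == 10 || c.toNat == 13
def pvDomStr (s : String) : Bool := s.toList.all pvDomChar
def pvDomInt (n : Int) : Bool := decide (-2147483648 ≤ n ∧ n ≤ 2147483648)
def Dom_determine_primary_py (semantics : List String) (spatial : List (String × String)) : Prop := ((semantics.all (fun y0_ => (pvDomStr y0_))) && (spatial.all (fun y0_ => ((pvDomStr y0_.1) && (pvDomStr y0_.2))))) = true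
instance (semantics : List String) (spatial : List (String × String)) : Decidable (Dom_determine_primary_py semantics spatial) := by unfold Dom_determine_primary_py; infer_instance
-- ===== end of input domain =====

-- B replaces A's scan of the fixed priority list (one membership test into
-- `semantics` per label) with a rank table built once and a single `min` pass
-- over `semantics`; same return value everywhere (alternative decomposition).

-- ===== PORT A =====
-- the `for sem in priority: if sem in semantics: return sem` loop
def pvLoopA : List String → List String → String → String
  | [], _, d => d
  | p :: ps, sem, d => if p ∈ sem then p else pvLoopA ps sem d

def determine_primary_py (semantics : List String) (spatial : List (String × String)) : String :=
  match semantics with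
  | [] => "unknown"
  | s0 :: _ =>
    let priority : List String := ["person", "subject", "gut", "brain", "heart", "hub", "node", "foreground", "background"]
    pvLoopA priority semantics s0          -- falls through to semantics[0] = s0

-- ===== PORT B =====
def determine_primary_py_alt (semantics : List String) (spatial : List (String × String)) : String :=
  match semantics with
  | [] => "unknown"
  | _ :: _ =>
    let priority : List String := ["person", "subject", "gut", "brain", "heart", "hub", "node", "foreground", "background"]
    let rank : PySem.Dict String Int :=
      (PySem.List.enumerate priority).foldl (fun d p => d.insert p.2 p.1) PySem.Dict.empty
    let n : Int := priority.length
    (PySem.List.min? semantics (fun s => rank.getD s n)).getD "unknown"   -- semantics ≠ [], so min? is some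

-- ===== PRECONDITION & SPEC =====
def Spec_determine_primary_py (semantics : List String) (spatial : List (String × String)) (out : String) : Prop := out = determine_primary_py_alt semantics spatial
instance (semantics : List String) (spatial : List (String × String)) (out : String) : Decidable (Spec_determine_primary_py semantics spatial out) := by unfold Spec_determine_primary_py; infer_instance

-- ===== CLAIM (what is proved, stated in full; the proofs are below) =====
def Claim_equal_determine_primary_py : Prop := ∀ (semantics : List String) (spatial : List (String × String)), Dom_determine_primary_py semantics spatial → Spec_determine_primary_py semantics spatial (determine_primary_py semantics spatial)

-- ===== LEMMAS AND PROOFS =====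

-- B's key function, written out (last insert outermost, as getD_insert unfolds it)
def pvKey (s : String) : Int :=
  if s = "background" then 8 else if s = "foreground" then 7 else if s = "node" then 6 else
  if s = "hub" then 5 else if s = "heart" then 4 else if s = "brain" then 3 else
  if s = "gut" then 2 else if s = "subject" then 1 else if s = "person" then 0 else 9

theorem pvKey_eq (s : String) :
    ((PySem.List.enumerate ["person", "subject", "gut", "brain", "heart", "hub", "node", "foreground", "background"]).foldl
      (fun d p => d.insert p.2 p.1) PySem.Dict.empty).getD s ((["person", "subject", "gut", "brain", "heart", "hub", "node", "foreground", "background"] : List String).length : Int) = pvKey s := by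
  simp [PySem.List.enumerate, List.foldl, PySem.Dict.getD_insert, PySem.Dict.getD_empty, pvKey]

theorem pvKey_nonneg (s : String) : 0 ≤ pvKey s := by
  unfold pvKey; split_ifs <;> norm_num

theorem pvKey_eq9 (y : String) (n0 : y ≠ "person") (n1 : y ≠ "subject") (n2 : y ≠ "gut") (n3 : y ≠ "brain") (n4 : y ≠ "heart") (n5 : y ≠ "hub") (n6 : y ≠ "node") (n7 : y ≠ "foreground") (n8 : y ≠ "background") : pvKey y = 9 := by
  unfold pvKey; split_ifs <;> simp_all

theorem pvKey_inv0 (m : String) (h : pvKey m = 0) : m = "person" := by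
  unfold pvKey at h; split_ifs at h <;> first | assumption | omega

theorem pvKey_inv1 (m : String) (h : pvKey m = 1) : m = "subject" := by
  unfold pvKey at h; split_ifs at h <;> first | assumption | omega

theorem pvKey_inv2 (m : String) (h : pvKey m = 2) : m = "gut" := by
  unfold pvKey at h; split_ifs at h <;> first | assumption | omega

theorem pvKey_inv3 (m : String) (h : pvKey m = 3) : m = "brain" := by
  unfold pvKey at h; split_ifs at h <;> first | assumption | omega

theorem pvKey_inv4 (m : String) (h : pvKey m = 4) : m = "heart" := by
  unfold pvKey at h; split_ifs at h <;> first | assumption | omega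

theorem pvKey_inv5 (m : String) (h : pvKey m = 5) : m = "hub" := by
  unfold pvKey at h; split_ifs at h <;> first | assumption | omega

theorem pvKey_inv6 (m : String) (h : pvKey m = 6) : m = "node" := by
  unfold pvKey at h; split_ifs at h <;> first | assumption | omega

theorem pvKey_inv7 (m : String) (h : pvKey m = 7) : m = "foreground" := by
  unfold pvKey at h; split_ifs at h <;> first | assumption | omega

theorem pvKey_inv8 (m : String) (h : pvKey m = 8) : m = "background" := by
  unfold pvKey at h; split_ifs at h <;> first | assumption | omega

-- `min?` keeps the head when no later element has a strictly smaller key (first-minimum rule)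
theorem pv_min?_cons (key : String → Int) (xs : List String) : ∀ (x : String),
    (∀ y ∈ xs, ¬ key y < key x) → PySem.List.min? (x :: xs) key = some x := by
  induction xs with
  | nil => intro x _; rfl
  | cons y ys ih =>
    intro x h
    have hy : ¬ key y < key x := h y (List.mem_cons_self ..)
    have step : PySem.List.min? (x :: y :: ys) key = PySem.List.min? (x :: ys) key := by
      simp only [PySem.List.min?, List.foldl]
      rw [if_neg hy]
    rw [step]
    exact ih x fun z hz => h z (List.mem_cons_of_mem _ hz)

-- the heart of the equivalence: A's priority scan = first key-minimal element of semantics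
theorem pv_main (s0 : String) (ss : List String) :
    pvLoopA ["person", "subject", "gut", "brain", "heart", "hub", "node", "foreground", "background"] (s0 :: ss) s0 = (PySem.List.min? (s0 :: ss) pvKey).getD "unknown" := by
  obtain ⟨m, hm⟩ : ∃ m, PySem.List.min? (s0 :: ss) pvKey = some m := by
    cases h : PySem.List.min? (s0 :: ss) pvKey with
    | none => exact absurd ((PySem.List.min?_eq_none_iff _ _).mp h) (by simp)
    | some m => exact ⟨m, rfl⟩
  have hmem := PySem.List.min?_mem hm
  have hmin := PySem.List.min?_isMin hm
  rw [hm, Option.getD_some]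
  by_cases h0 : "person" ∈ s0 :: ss
  · have hle := hmin _ h0
    have hkL : pvKey "person" = 0 := by decide
    rw [hkL] at hle
    have hnn := pvKey_nonneg m
    have hkm : pvKey m = 0 := by omega
    have hm' : m = "person" := pvKey_inv0 m hkm
    subst hm'
    simp [pvLoopA, h0]
  by_cases h1 : "subject" ∈ s0 :: ss
  · have hle := hmin _ h1
    have hkL : pvKey "subject" = 1 := by decide
    rw [hkL] at hle
    have hnn := pvKey_nonneg m
    have e0 : pvKey m ≠ 0 := fun e => h0 (pvKey_inv0 m e ▸ hmem)
    have hkm : pvKey m = 1 := by omega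
    have hm' : m = "subject" := pvKey_inv1 m hkm
    subst hm'
    simp [pvLoopA, h0, h1]
  by_cases h2 : "gut" ∈ s0 :: ss
  · have hle := hmin _ h2
    have hkL : pvKey "gut" = 2 := by decide
    rw [hkL] at hle
    have hnn := pvKey_nonneg m
    have e0 : pvKey m ≠ 0 := fun e => h0 (pvKey_inv0 m e ▸ hmem)
    have e1 : pvKey m ≠ 1 := fun e => h1 (pvKey_inv1 m e ▸ hmem)
    have hkm : pvKey m = 2 := by omega
    have hm' : m = "gut" := pvKey_inv2 m hkm
    subst hm'
    simp [pvLoopA, h0, h1, h2]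
  by_cases h3 : "brain" ∈ s0 :: ss
  · have hle := hmin _ h3
    have hkL : pvKey "brain" = 3 := by decide
    rw [hkL] at hle
    have hnn := pvKey_nonneg m
    have e0 : pvKey m ≠ 0 := fun e => h0 (pvKey_inv0 m e ▸ hmem)
    have e1 : pvKey m ≠ 1 := fun e => h1 (pvKey_inv1 m e ▸ hmem)
    have e2 : pvKey m ≠ 2 := fun e => h2 (pvKey_inv2 m e ▸ hmem)
    have hkm : pvKey m = 3 := by omega
    have hm' : m = "brain" := pvKey_inv3 m hkm
    subst hm'
    simp [pvLoopA, h0, h1, h2, h3]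
  by_cases h4 : "heart" ∈ s0 :: ss
  · have hle := hmin _ h4
    have hkL : pvKey "heart" = 4 := by decide
    rw [hkL] at hle
    have hnn := pvKey_nonneg m
    have e0 : pvKey m ≠ 0 := fun e => h0 (pvKey_inv0 m e ▸ hmem)
    have e1 : pvKey m ≠ 1 := fun e => h1 (pvKey_inv1 m e ▸ hmem)
    have e2 : pvKey m ≠ 2 := fun e => h2 (pvKey_inv2 m e ▸ hmem)
    have e3 : pvKey m ≠ 3 := fun e => h3 (pvKey_inv3 m e ▸ hmem)
    have hkm : pvKey m = 4 := by omega
    have hm' : m = "heart" := pvKey_inv4 m hkm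
    subst hm'
    simp [pvLoopA, h0, h1, h2, h3, h4]
  by_cases h5 : "hub" ∈ s0 :: ss
  · have hle := hmin _ h5
    have hkL : pvKey "hub" = 5 := by decide
    rw [hkL] at hle
    have hnn := pvKey_nonneg m
    have e0 : pvKey m ≠ 0 := fun e => h0 (pvKey_inv0 m e ▸ hmem)
    have e1 : pvKey m ≠ 1 := fun e => h1 (pvKey_inv1 m e ▸ hmem)
    have e2 : pvKey m ≠ 2 := fun e => h2 (pvKey_inv2 m e ▸ hmem)
    have e3 : pvKey m ≠ 3 := fun e => h3 (pvKey_inv3 m e ▸ hmem)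
    have e4 : pvKey m ≠ 4 := fun e => h4 (pvKey_inv4 m e ▸ hmem)
    have hkm : pvKey m = 5 := by omega
    have hm' : m = "hub" := pvKey_inv5 m hkm
    subst hm'
    simp [pvLoopA, h0, h1, h2, h3, h4, h5]
  by_cases h6 : "node" ∈ s0 :: ss
  · have hle := hmin _ h6
    have hkL : pvKey "node" = 6 := by decide
    rw [hkL] at hle
    have hnn := pvKey_nonneg m
    have e0 : pvKey m ≠ 0 := fun e => h0 (pvKey_inv0 m e ▸ hmem)
    have e1 : pvKey m ≠ 1 := fun e => h1 (pvKey_inv1 m e ▸ hmem)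
    have e2 : pvKey m ≠ 2 := fun e => h2 (pvKey_inv2 m e ▸ hmem)
    have e3 : pvKey m ≠ 3 := fun e => h3 (pvKey_inv3 m e ▸ hmem)
    have e4 : pvKey m ≠ 4 := fun e => h4 (pvKey_inv4 m e ▸ hmem)
    have e5 : pvKey m ≠ 5 := fun e => h5 (pvKey_inv5 m e ▸ hmem)
    have hkm : pvKey m = 6 := by omega
    have hm' : m = "node" := pvKey_inv6 m hkm
    subst hm'
    simp [pvLoopA, h0, h1, h2, h3, h4, h5, h6]
  by_cases h7 : "foreground" ∈ s0 :: ss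
  · have hle := hmin _ h7
    have hkL : pvKey "foreground" = 7 := by decide
    rw [hkL] at hle
    have hnn := pvKey_nonneg m
    have e0 : pvKey m ≠ 0 := fun e => h0 (pvKey_inv0 m e ▸ hmem)
    have e1 : pvKey m ≠ 1 := fun e => h1 (pvKey_inv1 m e ▸ hmem)
    have e2 : pvKey m ≠ 2 := fun e => h2 (pvKey_inv2 m e ▸ hmem)
    have e3 : pvKey m ≠ 3 := fun e => h3 (pvKey_inv3 m e ▸ hmem)
    have e4 : pvKey m ≠ 4 := fun e => h4 (pvKey_inv4 m e ▸ hmem)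
    have e5 : pvKey m ≠ 5 := fun e => h5 (pvKey_inv5 m e ▸ hmem)
    have e6 : pvKey m ≠ 6 := fun e => h6 (pvKey_inv6 m e ▸ hmem)
    have hkm : pvKey m = 7 := by omega
    have hm' : m = "foreground" := pvKey_inv7 m hkm
    subst hm'
    simp [pvLoopA, h0, h1, h2, h3, h4, h5, h6, h7]
  by_cases h8 : "background" ∈ s0 :: ss
  · have hle := hmin _ h8
    have hkL : pvKey "background" = 8 := by decide
    rw [hkL] at hle
    have hnn := pvKey_nonneg m
    have e0 : pvKey m ≠ 0 := fun e => h0 (pvKey_inv0 m e ▸ hmem)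
    have e1 : pvKey m ≠ 1 := fun e => h1 (pvKey_inv1 m e ▸ hmem)
    have e2 : pvKey m ≠ 2 := fun e => h2 (pvKey_inv2 m e ▸ hmem)
    have e3 : pvKey m ≠ 3 := fun e => h3 (pvKey_inv3 m e ▸ hmem)
    have e4 : pvKey m ≠ 4 := fun e => h4 (pvKey_inv4 m e ▸ hmem)
    have e5 : pvKey m ≠ 5 := fun e => h5 (pvKey_inv5 m e ▸ hmem)
    have e6 : pvKey m ≠ 6 := fun e => h6 (pvKey_inv6 m e ▸ hmem)
    have e7 : pvKey m ≠ 7 := fun e => h7 (pvKey_inv7 m e ▸ hmem)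
    have hkm : pvKey m = 8 := by omega
    have hm' : m = "background" := pvKey_inv8 m hkm
    subst hm'
    simp [pvLoopA, h0, h1, h2, h3, h4, h5, h6, h7, h8]
  · -- no priority label present: every key is 9, min? keeps the head
    have hks0 : pvKey s0 = 9 := pvKey_eq9 s0
      (fun e => h0 (e ▸ List.mem_cons_self ..))
      (fun e => h1 (e ▸ List.mem_cons_self ..))
      (fun e => h2 (e ▸ List.mem_cons_self ..))
      (fun e => h3 (e ▸ List.mem_cons_self ..))
      (fun e => h4 (e ▸ List.mem_cons_self ..))
      (fun e => h5 (e ▸ List.mem_cons_self ..))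
      (fun e => h6 (e ▸ List.mem_cons_self ..))
      (fun e => h7 (e ▸ List.mem_cons_self ..))
      (fun e => h8 (e ▸ List.mem_cons_self ..))
    have hall : ∀ y ∈ ss, ¬ pvKey y < pvKey s0 := by
      intro y hy
      have hy9 : pvKey y = 9 := pvKey_eq9 y
        (fun e => h0 (e ▸ List.mem_cons_of_mem _ hy))
        (fun e => h1 (e ▸ List.mem_cons_of_mem _ hy))
        (fun e => h2 (e ▸ List.mem_cons_of_mem _ hy))
        (fun e => h3 (e ▸ List.mem_cons_of_mem _ hy))
        (fun e => h4 (e ▸ List.mem_cons_of_mem _ hy))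
        (fun e => h5 (e ▸ List.mem_cons_of_mem _ hy))
        (fun e => h6 (e ▸ List.mem_cons_of_mem _ hy))
        (fun e => h7 (e ▸ List.mem_cons_of_mem _ hy))
        (fun e => h8 (e ▸ List.mem_cons_of_mem _ hy))
      rw [hks0, hy9]; omega
    have hfirst := pv_min?_cons pvKey ss s0 hall
    rw [hm] at hfirst
    have hms : m = s0 := Option.some.inj hfirst
    subst hms
    simp [pvLoopA, h0, h1, h2, h3, h4, h5, h6, h7, h8]

-- ===== VERDICT (by name: the statement is the Claim_ definition above) =====
theorem determine_primary_py_spec : Claim_equal_determine_primary_py := by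
  intro semantics spatial _
  unfold Spec_determine_primary_py determine_primary_py determine_primary_py_alt
  match semantics with
  | [] => rfl
  | s0 :: ss =>
    simp only
    rw [show (fun s => ((PySem.List.enumerate ["person", "subject", "gut", "brain", "heart", "hub", "node", "foreground", "background"]).foldl
        (fun d p => d.insert p.2 p.1) PySem.Dict.empty).getD s
        ((["person", "subject", "gut", "brain", "heart", "hub", "node", "foreground", "background"] : List String).length : Int)) = pvKey from funext fun s => pvKey_eq s]
    exact pv_main s0 ss
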